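-- pv_equiv track=rewrite | github.com/youngsoosoo/PythonTest | 프로그래머스/unrated/142085. 디펜스 게임/디펜스 게임.py | solution
-- ===== SOURCE A (Python) =====
-- import heapq as hq
--
-- def solution(n, k, enemy):
--     answer, sum_enemy = 0, 0
--     x=[]
--     for i in enemy:
--         hq.heappush(x, -i)
--         sum_enemy += i
--         if sum_enemy > n:
--             if k == 0:
--                 break
--             hx = hq.heappop(x)
--
--             sum_enemy += hx
--             k-=1
--         answer += 1
--
--     return answer
-- ===== SOURCE B (Python) =====
-- def solution(n, k, enemy):
--     rem, pool, rounds = n, [], 0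
--     for w in enemy:
--         i = 0
--         while i < len(pool) and pool[i] > w:
--             i += 1
--         pool.insert(i, w)          # pool stays sorted in descending order
--         rem -= w
--         if rem < 0:
--             if k == 0:
--                 return rounds
--             rem += pool.pop(0)     # give back the largest wave faced so far
--             k -= 1
--         rounds += 1
--     return rounds
-- ===== Notes on version B (the rewrite author's own statement) =====
-- stated objective: alternative
-- what changed: Replaces the negated min-heap plus running attack sum by a descending-sorted pool maintained with scan-insertion and pop(0) for the largest, and tracks the remaining soldier budget (rem = n - spent) instead of the accumulated sum, early-returning the round counter instead of break.
import Mathlib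
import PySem

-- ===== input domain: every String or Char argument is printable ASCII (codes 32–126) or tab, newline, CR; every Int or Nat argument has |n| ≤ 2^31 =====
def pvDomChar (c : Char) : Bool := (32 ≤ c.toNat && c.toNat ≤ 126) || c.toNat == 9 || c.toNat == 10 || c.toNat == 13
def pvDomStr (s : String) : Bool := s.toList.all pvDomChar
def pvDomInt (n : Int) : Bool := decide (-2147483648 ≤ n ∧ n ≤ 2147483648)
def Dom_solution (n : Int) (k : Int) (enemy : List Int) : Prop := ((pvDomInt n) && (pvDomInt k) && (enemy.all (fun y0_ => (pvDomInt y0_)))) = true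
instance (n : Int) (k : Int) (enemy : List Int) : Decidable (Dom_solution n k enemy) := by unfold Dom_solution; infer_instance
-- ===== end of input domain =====

-- B keeps a descending-sorted pool (scan-insertion, pop(0) for the largest) and tracks the
-- remaining soldier budget instead of A's negated min-heap plus running attack sum;
-- objective: alternative data structure / state, not faster.

-- ===== PORT A =====
-- A's loop: state (answer, sum_enemy, heap x, k); hq.heappush/heappop are library calls,
-- ported by their value contract on the multiset: push = append, pop = remove the minimum
-- (x is always nonempty at the pop, so the .getD defaults are never used).
def solutionGo (n : Int) : List Int → Int → Int → List Int → Int → Int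
  | [], answer, _, _, _ => answer
  | i :: rest, answer, sumEnemy, x, k =>
    let x1 := x ++ [-i]
    let s1 := sumEnemy + i
    if s1 > n then
      if k = 0 then answer  -- break
      else
        let hx := (PySem.List.min? x1 (fun y => y)).getD 0
        let x2 := (PySem.List.remove? x1 hx).getD x1
        solutionGo n rest (answer + 1) (s1 + hx) x2 (k - 1)
    else
      solutionGo n rest (answer + 1) s1 x1 k

def solution (n : Int) (k : Int) (enemy : List Int) : Int :=
  solutionGo n enemy 0 0 [] k

-- ===== PORT B =====
-- B's inner while loop `while i < len(pool) and pool[i] > w: i += 1` computing the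
-- insertion index in the descending-sorted pool:
def placeIdx : List Int → Int → Nat
  | [], _ => 0
  | a :: t, w => if a > w then placeIdx t w + 1 else 0

-- B's for loop: state (rem, pool, rounds, k); the early `return rounds` is the base value,
-- pool.pop(0) is PySem.List.pop? at 0 (pool is nonempty there, the .getD default is never used).
def solutionAltGo (nn : Int) : List Int → Int → List Int → Int → Int → Int
  | [], _, _, _, rounds => rounds
  | w :: rest, rem, pool, k, rounds =>
    let pool1 := PySem.List.insert pool ((placeIdx pool w : Nat) : Int) w
    let rem1 := rem - w
    if rem1 < 0 then
      if k = 0 then rounds  -- return rounds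
      else
        let pr := (PySem.List.pop? pool1 0).getD (0, pool1)
        solutionAltGo nn rest (rem1 + pr.1) pr.2 (k - 1) (rounds + 1)
    else
      solutionAltGo nn rest rem1 pool1 k (rounds + 1)

def solution_alt (n : Int) (k : Int) (enemy : List Int) : Int :=
  solutionAltGo n enemy n [] k 0

-- ===== PRECONDITION & SPEC =====
def Spec_solution (n : Int) (k : Int) (enemy : List Int) (out : Int) : Prop := out = solution_alt n k enemy
instance (n : Int) (k : Int) (enemy : List Int) (out : Int) : Decidable (Spec_solution n k enemy out) := by unfold Spec_solution; infer_instance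

-- ===== CLAIM (what is proved, stated in full; the proofs are below) =====
def Claim_equal_solution : Prop := ∀ (n : Int) (k : Int) (enemy : List Int), Dom_solution n k enemy → Spec_solution n k enemy (solution n k enemy)

-- ===== LEMMAS AND PROOFS =====

-- proof-side view of B's insertion: scan index + list.insert = ordered insertion
def ordIns : List Int → Int → List Int
  | [], w => [w]
  | a :: t, w => if a > w then a :: ordIns t w else w :: a :: t

lemma placeIdx_le_length (pool : List Int) (w : Int) : placeIdx pool w ≤ pool.length := by
  induction pool with
  | nil => simp [placeIdx]
  | cons a t ih =>
    by_cases h : a > w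
    · simp [placeIdx, h]; omega
    · simp [placeIdx, h]

lemma insert_placeIdx (pool : List Int) (w : Int) :
    PySem.List.insert pool ((placeIdx pool w : Nat) : Int) w = ordIns pool w := by
  induction pool with
  | nil => rfl
  | cons a t ih =>
    by_cases h : a > w
    · rw [PySem.List.insert_natCast _ _ _ (placeIdx_le_length (a :: t) w)] at *
      rw [PySem.List.insert_natCast _ _ _ (placeIdx_le_length t w)] at ih
      simp [placeIdx, h, ordIns, ih]
    · rw [PySem.List.insert_natCast _ _ _ (placeIdx_le_length (a :: t) w)]
      simp [placeIdx, h, ordIns]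

lemma ordIns_perm (pool : List Int) (w : Int) : (ordIns pool w).Perm (w :: pool) := by
  induction pool with
  | nil => simp [ordIns]
  | cons a t ih =>
    by_cases h : a > w
    · simpa [ordIns, h] using (ih.cons a).trans (List.Perm.swap w a t)
    · simp [ordIns, h]

lemma mem_ordIns {y : Int} (pool : List Int) (w : Int) :
    y ∈ ordIns pool w ↔ y = w ∨ y ∈ pool := by
  constructor
  · intro h; have := (ordIns_perm pool w).mem_iff.mp h; simpa using this
  · intro h; exact (ordIns_perm pool w).mem_iff.mpr (by simpa using h)

lemma ordIns_sorted (pool : List Int) (w : Int) (h : pool.Pairwise (· ≥ ·)) :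
    (ordIns pool w).Pairwise (· ≥ ·) := by
  induction pool with
  | nil => simp [ordIns]
  | cons a t ih =>
    rcases List.pairwise_cons.mp h with ⟨ha, ht⟩
    by_cases hw : a > w
    · rw [ordIns, if_pos hw]
      refine List.pairwise_cons.mpr ⟨?_, ih ht⟩
      intro y hy
      rcases (mem_ordIns t w).mp hy with rfl | hy
      · omega
      · exact ha y hy
    · rw [ordIns, if_neg hw]
      refine List.pairwise_cons.mpr ⟨?_, h⟩
      intro y hy
      rcases List.mem_cons.mp hy with rfl | hy
      · omega
      · have := ha y hy; omega

-- running-min fold: value, membership and lower-bound characterisation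
lemma foldl_min_spec (t : List Int) (x : Int) :
    (t.foldl min x = x ∨ t.foldl min x ∈ t) ∧ t.foldl min x ≤ x ∧ ∀ y ∈ t, t.foldl min x ≤ y := by
  induction t generalizing x with
  | nil => simp
  | cons a t ih =>
    rcases ih (min x a) with ⟨hmem, hle, hlb⟩
    refine ⟨?_, ?_, ?_⟩
    · rcases hmem with h | h
      · by_cases hxa : x ≤ a
        · left; rw [List.foldl_cons, h, min_eq_left hxa]
        · right
          have hm : min x a = a := min_eq_right (by omega)
          rw [List.foldl_cons, h, hm]
          exact List.mem_cons_self ..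
      · right; rw [List.foldl_cons]; exact List.mem_cons_of_mem a h
    · simp only [List.foldl] at *; omega
    · intro y hy
      rcases List.mem_cons.mp hy with rfl | hy
      · simp only [List.foldl] at *; omega
      · exact hlb y hy

-- min? of any list permutation-equal to (-h :: t.map neg) with -h a lower bound is some (-h)
lemma min?_of_perm_sorted (x1 : List Int) (h : Int) (t : List Int)
    (hperm : x1.Perm ((h :: t).map (fun e => -e)))
    (hub : ∀ y ∈ t, y ≤ h) :
    PySem.List.min? x1 (fun y => y) = some (-h) := by
  obtain ⟨a, s, rfl⟩ : ∃ a s, x1 = a :: s := by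
    cases x1 with
    | nil => exact absurd hperm.symm (by simp)
    | cons a s => exact ⟨a, s, rfl⟩
  rw [PySem.List.min?_id_cons]
  congr 1
  rcases foldl_min_spec s a with ⟨hmem, hle, hlb⟩
  have hlbAll : ∀ y ∈ a :: s, s.foldl min a ≤ y := by
    intro y hy
    rcases List.mem_cons.mp hy with rfl | hy
    · exact hle
    · exact hlb y hy
  have hmemAll : s.foldl min a ∈ a :: s := by
    rcases hmem with h | h
    · simp [h]
    · exact List.mem_cons_of_mem a h
  -- -h is the minimum of the same multiset
  have hmemNeg : s.foldl min a ∈ (h :: t).map (fun e => -e) := hperm.mem_iff.mp hmemAll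
  have hhead : (-h) ∈ a :: s := hperm.mem_iff.mpr (by simp)
  have h1 : s.foldl min a ≤ -h := hlbAll _ hhead
  have h2 : -h ≤ s.foldl min a := by
    rcases List.mem_map.mp hmemNeg with ⟨e, he, hval⟩
    rcases List.mem_cons.mp he with rfl | he
    · omega
    · have := hub e he; omega
  omega

-- the main loop correspondence: A's heap is B's descending pool, negated; A's sum is n - B's rem.
lemma go_eq (nn : Int) (rest : List Int) :
    ∀ (ans sumE k : Int) (x pool : List Int),
    x.Perm (pool.map (fun e => -e)) → pool.Pairwise (· ≥ ·) →
    solutionGo nn rest ans sumE x k = solutionAltGo nn rest (nn - sumE) pool k ans := by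
  induction rest with
  | nil => intro ans sumE k x pool _ _; simp [solutionGo, solutionAltGo]
  | cons w rest ih =>
    intro ans sumE k x pool hperm hsort
    have hins : PySem.List.insert pool ((placeIdx pool w : Nat) : Int) w = ordIns pool w :=
      insert_placeIdx pool w
    obtain ⟨h, t, hpool1⟩ : ∃ h t, ordIns pool w = h :: t := by
      cases hp : ordIns pool w with
      | nil => exact absurd (hp ▸ ordIns_perm pool w) (by simp)
      | cons h t => exact ⟨h, t, rfl⟩
    have hperm1 : (x ++ [-w]).Perm ((h :: t).map (fun e => -e)) := by
      have p1 : (x ++ [-w]).Perm (-w :: x) := List.perm_append_singleton _ _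
      have p2 : (-w :: x).Perm ((w :: pool).map (fun e => -e)) := by
        simpa using hperm.cons (-w)
      have p3 : ((w :: pool).map (fun e => -e)).Perm ((h :: t).map (fun e => -e)) := by
        have := ((ordIns_perm pool w).symm).map (fun e : Int => -e)
        simpa [hpool1] using this
      exact p1.trans (p2.trans p3)
    have hsort1 : (h :: t).Pairwise (· ≥ ·) := hpool1 ▸ ordIns_sorted pool w hsort
    have hub : ∀ y ∈ t, y ≤ h := fun y hy => (List.pairwise_cons.mp hsort1).1 y hy
    have hcond : (sumE + w > nn) ↔ ((nn - sumE) - w < 0) := by omega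
    by_cases hs : sumE + w > nn
    · by_cases hk : k = 0
      · rw [solutionGo, solutionAltGo]
        simp only [hins, hpool1, if_pos hs, if_pos (hcond.mp hs), if_pos hk]
      · have hmin : PySem.List.min? (x ++ [-w]) (fun y => y) = some (-h) :=
          min?_of_perm_sorted _ h t hperm1 hub
        have hmemx : (-h) ∈ x ++ [-w] := hperm1.mem_iff.mpr (by simp)
        have hrem : PySem.List.remove? (x ++ [-w]) (-h) = some ((x ++ [-w]).erase (-h)) :=
          PySem.List.remove?_eq_some_erase _ _ hmemx
        have hperm2 : ((x ++ [-w]).erase (-h)).Perm (t.map (fun e => -e)) := by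
          have := hperm1.erase (-h)
          simpa [List.erase_cons_head] using this
        have hpop : PySem.List.pop? (h :: t) 0 = some (h, t) := PySem.List.pop?_zero_cons _ _
        rw [solutionGo, solutionAltGo]
        simp only [hins, hpool1, if_pos hs, if_pos (hcond.mp hs), if_neg hk,
          hmin, hrem, hpop, Option.getD_some]
        rw [ih (ans + 1) (sumE + w + -h) (k - 1) _ t hperm2 (List.Pairwise.of_cons hsort1)]
        congr 1
        omega
    · rw [solutionGo, solutionAltGo]
      simp only [hins, hpool1, if_neg hs, if_neg (fun hc => hs (hcond.mpr hc))]
      rw [ih (ans + 1) (sumE + w) k _ (h :: t) hperm1 hsort1]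
      congr 1
      omega

-- ===== VERDICT (by name: the statement is the Claim_ definition above) =====
theorem solution_spec : Claim_equal_solution := by
  intro n k enemy _
  unfold Spec_solution solution solution_alt
  simpa using go_eq n enemy 0 0 k [] [] (by simp) (by simp)
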